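-- pv_equiv track=rewrite | github.com/wilmurillo-ai/Design-Assistant | .skills/openclaw-skills/skills/fslong520/inkpot/inkpot.py | _parse_kv_block
-- ===== SOURCE A (Python) =====
-- from typing import Optional, List, Dict
--
-- def _parse_kv_block(block: str) -> Dict:
--     """解析单个 KV 块"""
--     result = {}
--     lines = block.strip().split('\n')
--     current_key = None
--     current_value = []
--
--     for line in lines:
--         # 空行跳过
--         if not line.strip():
--             continue
--
--         # 检查是否是新字段 (key: value)
--         if ':' in line:
--             parts = line.split(':', 1)
--             # 保存上一个字段
--             if current_key:
--                 value = '\n'.join(current_value).strip()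
--                 # 处理列表字段
--                 if current_key in ['tags', 'related']:
--                     result[current_key] = [t.strip() for t in value.split(',') if t.strip()]
--                 else:
--                     result[current_key] = value
--             # 开始新字段
--             current_key = parts[0].strip()
--             current_value = [parts[1].strip() if len(parts) > 1 else '']
--         else:
--             # 续行
--             if current_key:
--                 current_value.append(line.strip())
--
--     # 保存最后一个字段
--     if current_key:
--         value = '\n'.join(current_value).strip()
--         if current_key in ['tags', 'related']:
--             result[current_key] = [t.strip() for t in value.split(',') if t.strip()]
--         else:
--             result[current_key] = value
--
--     return result
-- ===== SOURCE B (Python) =====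
-- def _parse_kv_block(block: str) -> dict:
--     # Pass 1: group the lines into (key, value-lines) records.
--     records = []
--     for line in block.strip().split('\n'):
--         if ':' in line:
--             key, rest = line.split(':', 1)
--             records.append((key.strip(), [rest.strip()]))
--         elif line.strip() and records:
--             records[-1][1].append(line.strip())
--     # Pass 2: assemble the dict, dropping records whose key is empty.
--     result = {}
--     for key, vals in records:
--         if not key:
--             continue
--         value = '\n'.join(vals).strip()
--         if key in ('tags', 'related'):
--             result[key] = [t.strip() for t in value.split(',') if t.strip()]
--         else:
--             result[key] = value
--     return result
-- ===== Notes on version B (the rewrite author's own statement) =====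
-- stated objective: alternative
-- what changed: A interleaves parsing and saving in one stateful loop (current_key/current_value flushed at each new key and at the end); B first groups the lines into a list of (key, value-lines) records in one pass, then assembles the dict from the records in a second pass, so there is no pending-state flushing. B matches A on every input, including the tags/related list values; …
-- outside the precondition, e.g. on _parse_kv_block('tags: a, b'): A returns {'tags': ['a', 'b']}, B returns {'tags': ['a', 'b']}; on _parse_kv_block('related: x'): A returns {'related': ['x']}, B returns {'related': ['x']}
import Mathlib
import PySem

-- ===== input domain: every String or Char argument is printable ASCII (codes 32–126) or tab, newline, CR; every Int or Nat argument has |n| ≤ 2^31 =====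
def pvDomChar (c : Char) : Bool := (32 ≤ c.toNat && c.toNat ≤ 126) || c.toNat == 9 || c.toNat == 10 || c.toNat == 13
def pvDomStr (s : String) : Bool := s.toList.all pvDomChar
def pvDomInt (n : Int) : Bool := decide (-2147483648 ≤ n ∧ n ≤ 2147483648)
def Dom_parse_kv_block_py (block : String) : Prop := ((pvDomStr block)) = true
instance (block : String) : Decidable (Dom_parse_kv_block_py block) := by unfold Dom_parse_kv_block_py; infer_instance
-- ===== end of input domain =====

-- B replaces A's single stateful flush-on-new-key loop by a two-pass decomposition
-- (group lines into (key, value-lines) records, then assemble the dict): an alternative of the same cost.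
-- B's Python matches A's on every input, tags/related included; the Lean claim covers the
-- string-valued outputs only (see Pre_ below).


-- ===== PORT A =====
-- A saves the pending field: value = '\n'.join(current_value).strip(). For the keys
-- 'tags'/'related' A (and B) store a LIST value; the required Lean result type
-- List (String × String) has string values only, so those inputs are outside Pre_
-- and the port carries only the string-valued branch (exact on Pre_).
def pvSaveA (res : PySem.Dict String String) (key : String) (vals : List String) :
    PySem.Dict String String :=
  res.insert key (PySem.Str.strip (PySem.Str.join "\n" vals))

-- the for-loop over lines, state (result, current_key, current_value); current_key = "" models None (same truthiness)
def pvGoA : List String → PySem.Dict String String → String → List String →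
    PySem.Dict String String
  | [], res, key, vals => if key ≠ "" then pvSaveA res key vals else res
  | l :: ls, res, key, vals =>
    if PySem.Str.strip l = "" then pvGoA ls res key vals
    else if PySem.Str.isIn ":" l then
      let parts := (PySem.Str.splitMax? l ":" 1).getD []
      let res' := if key ≠ "" then pvSaveA res key vals else res
      pvGoA ls res' (PySem.Str.strip (parts.headD ""))
        [if parts.length > 1 then PySem.Str.strip (parts.getD 1 "") else ""]
    else if key ≠ "" then pvGoA ls res key (vals ++ [PySem.Str.strip l])
    else pvGoA ls res key vals

def parse_kv_block_py (block : String) : List (String × String) :=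
  (pvGoA ((PySem.Str.split? (PySem.Str.strip block) "\n").getD []) PySem.Dict.empty "" []).items

-- ===== PORT B =====
-- pass 1: group lines into (key, value-lines) records; acc holds the records newest-first
def pvPass1 : List String → List (String × List String) → List (String × List String)
  | [], acc => acc.reverse
  | l :: ls, acc =>
    if PySem.Str.isIn ":" l then
      let parts := (PySem.Str.splitMax? l ":" 1).getD []
      pvPass1 ls ((PySem.Str.strip (parts.headD ""), [PySem.Str.strip (parts.getD 1 "")]) :: acc)
    else if PySem.Str.strip l ≠ "" then
      match acc with
      | [] => pvPass1 ls []
      | (k, vs) :: rest => pvPass1 ls ((k, vs ++ [PySem.Str.strip l]) :: rest)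
    else pvPass1 ls acc

-- pass 2 body: skip empty keys, else store the joined/stripped value
-- (Source B's 'tags'/'related' branch stores a list value — outside Pre_, see pvSaveA)
def pvStep2 (d : PySem.Dict String String) (r : String × List String) :
    PySem.Dict String String :=
  if r.1 = "" then d else d.insert r.1 (PySem.Str.strip (PySem.Str.join "\n" r.2))

def parse_kv_block_py_alt (block : String) : List (String × String) :=
  ((pvPass1 ((PySem.Str.split? (PySem.Str.strip block) "\n").getD []) []).foldl pvStep2
    PySem.Dict.empty).items

-- ===== PRECONDITION & SPEC =====
-- Pre_ excludes blocks containing a line whose key (text before the first ':', stripped) is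
-- 'tags' or 'related': there BOTH programs return the SAME dict, but its value for that key
-- is a Python list, not a string, so the output is not a value of the required Lean result
-- type List (String × String) and cannot be claimed (B reproduces A's list values in Python).
def Pre_parse_kv_block_py (block : String) : Prop :=
  ∀ l ∈ (PySem.Str.split? (PySem.Str.strip block) "\n").getD [],
    PySem.Str.isIn ":" l = true →
      PySem.Str.strip (((PySem.Str.splitMax? l ":" 1).getD []).headD "") ≠ "tags" ∧
      PySem.Str.strip (((PySem.Str.splitMax? l ":" 1).getD []).headD "") ≠ "related"
instance (block : String) : Decidable (Pre_parse_kv_block_py block) := by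
  unfold Pre_parse_kv_block_py; infer_instance

def pvWitness_parse_kv_block_py : String := "name: ink\ndesc: a pot\n of ink"

def Spec_parse_kv_block_py (block : String) (out : List (String × String)) : Prop :=
  out = parse_kv_block_py_alt block
instance (block : String) (out : List (String × String)) :
    Decidable (Spec_parse_kv_block_py block out) := by
  unfold Spec_parse_kv_block_py; infer_instance

-- ===== CLAIM (what is proved, stated in full; the proofs are below) =====
def Claim_equal_parse_kv_block_py : Prop :=
  ∀ (block : String), Dom_parse_kv_block_py block → Pre_parse_kv_block_py block →
    Spec_parse_kv_block_py block (parse_kv_block_py block)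

-- ===== LEMMAS AND PROOFS =====

-- a block that strips to "" is all whitespace
theorem pvStripNil (s : List Char) (h : PySem.Chars.strip s = []) :
    ∀ x ∈ s, PySem.Chars.isspace x = true := by
  intro x hx
  rw [← List.takeWhile_append_dropWhile (p := PySem.Chars.isspace) (l := s)] at hx
  rcases List.mem_append.mp hx with h1 | h2
  · exact List.mem_takeWhile_imp h1
  · simp only [PySem.Chars.strip, PySem.Chars.rstrip, PySem.Chars.lstrip,
      List.reverse_eq_nil_iff] at h
    exact List.dropWhile_eq_nil_iff.mp h x (List.mem_reverse.mpr h2)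

-- a line containing ':' never strips to ""
theorem pvNoColon (l : String) (h : PySem.Str.strip l = "") :
    PySem.Str.isIn ":" l = false := by
  by_contra hc
  have hc' : PySem.Str.isIn ":" l = true := by
    cases hb : PySem.Str.isIn ":" l with
    | false => exact absurd hb hc
    | true => rfl
  have hinf := (PySem.Str.isIn_iff_infix ":" l).mp hc'
  rw [show (":").toList = [':'] from rfl] at hinf
  have hmem : ':' ∈ l.toList := hinf.mem (List.mem_singleton_self ':')
  have hstrip : PySem.Chars.strip l.toList = [] := by
    have := congrArg String.toList h
    simpa using this
  have := pvStripNil l.toList hstrip ':' hmem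
  simp [PySem.Chars.isspace] at this

-- A's conditional second part and B's unconditional one coincide (getD defaults to "")
theorem pvPart1_eq (parts : List String) :
    (if parts.length > 1 then PySem.Str.strip (parts.getD 1 "") else "") =
      PySem.Str.strip (parts.getD 1 "") := by
  match parts with
  | [] => rfl
  | [a] => rfl
  | a :: b :: t => simp

-- A's loop ignores current_value while current_key is empty
theorem pvGoA_key_empty (ls : List String) (res : PySem.Dict String String)
    (vals vals' : List String) : pvGoA ls res "" vals = pvGoA ls res "" vals' := by
  induction ls generalizing res vals vals' with
  | nil => simp [pvGoA]
  | cons l ls ih =>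
    by_cases h1 : PySem.Str.strip l = ""
    · simp only [pvGoA, if_pos h1]
      exact ih res vals vals'
    · by_cases h2 : PySem.Str.isIn ":" l = true
      · simp only [pvGoA, if_neg h1, h2, if_true, ne_eq,
          not_true_eq_false, if_false]
      · have h2' : PySem.Str.isIn ":" l = false := by
          cases hb : PySem.Str.isIn ":" l with
          | false => rfl
          | true => exact absurd hb h2
        simp only [pvGoA, if_neg h1, h2', Bool.false_eq_true, if_false, ne_eq,
          not_true_eq_false]
        exact ih res vals vals'

-- pass 1 never touches records below a nonempty front: they come out reversed, frozen
theorem pvPass1_freeze (ls : List String) (front tail : List (String × List String))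
    (h : front ≠ []) :
    pvPass1 ls (front ++ tail) = tail.reverse ++ pvPass1 ls front := by
  induction ls generalizing front tail with
  | nil => simp [pvPass1]
  | cons l ls ih =>
    match front, h with
    | f :: fs, _ =>
      simp only [pvPass1, List.cons_append]
      split_ifs with h1 h2
      · exact ih ((PySem.Str.strip (((PySem.Str.splitMax? l ":" 1).getD []).headD ""),
          [PySem.Str.strip (((PySem.Str.splitMax? l ":" 1).getD []).getD 1 "")]) :: f :: fs)
          tail (by simp)
      · obtain ⟨k, vs⟩ := f
        exact ih ((k, vs ++ [PySem.Str.strip l]) :: fs) tail (by simp)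
      · exact ih (f :: fs) tail (by simp)

-- the bridge: A's loop from state (res, key, vals) equals folding pass 2 over
-- the records pass 1 produces from the single pending record (key, vals)
theorem pvGoA_eq_pass (ls : List String) (res : PySem.Dict String String)
    (key : String) (vals : List String) :
    pvGoA ls res key vals = (pvPass1 ls [(key, vals)]).foldl pvStep2 res := by
  induction ls generalizing res key vals with
  | nil =>
    by_cases hk : key = "" <;> simp [pvGoA, pvPass1, pvStep2, pvSaveA, hk]
  | cons l ls ih =>
    by_cases h1 : PySem.Str.strip l = ""
    · have hc : PySem.Str.isIn ":" l = false := pvNoColon l h1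
      simp only [pvGoA, pvPass1, h1, hc, if_true, Bool.false_eq_true, if_false, ne_eq,
        not_true_eq_false]
      exact ih res key vals
    · by_cases h2 : PySem.Str.isIn ":" l = true
      · simp only [pvGoA, pvPass1, if_neg h1, h2, if_true]
        rw [pvPart1_eq]
        have hfr := pvPass1_freeze ls
          [(PySem.Str.strip (((PySem.Str.splitMax? l ":" 1).getD []).headD ""),
            [PySem.Str.strip (((PySem.Str.splitMax? l ":" 1).getD []).getD 1 "")])]
          [(key, vals)] (by simp)
        simp only [List.singleton_append, List.reverse_singleton] at hfr
        rw [hfr, List.foldl_cons]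
        by_cases hk : key = ""
        · simp only [hk, ne_eq, not_true_eq_false, if_false]
          rw [ih]
          simp [pvStep2]
        · simp only [if_pos (show key ≠ "" from hk)]
          rw [ih]
          simp [pvStep2, pvSaveA, hk]
      · have h2' : PySem.Str.isIn ":" l = false := by
          cases hb : PySem.Str.isIn ":" l with
          | false => rfl
          | true => exact absurd hb h2
        by_cases hk : key = ""
        · simp only [pvGoA, pvPass1, if_neg h1, h2', Bool.false_eq_true, if_false,
            hk, ne_eq, not_true_eq_false]
          rw [if_pos (show ¬PySem.Str.strip l = "" from h1),
            pvGoA_key_empty ls res vals (vals ++ [PySem.Str.strip l])]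
          exact ih res "" (vals ++ [PySem.Str.strip l])
        · simp only [pvGoA, pvPass1, if_neg h1, h2', Bool.false_eq_true, if_false,
            if_pos (show key ≠ "" from hk)]
          rw [if_pos (show ¬PySem.Str.strip l = "" from h1)]
          exact ih res key (vals ++ [PySem.Str.strip l])

-- A from the initial state (None, []) equals B's two passes from no records
theorem pvGoA_init (ls : List String) (res : PySem.Dict String String) :
    pvGoA ls res "" [] = (pvPass1 ls []).foldl pvStep2 res := by
  induction ls generalizing res with
  | nil => simp [pvGoA, pvPass1]
  | cons l ls ih =>
    by_cases h1 : PySem.Str.strip l = ""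
    · have hc : PySem.Str.isIn ":" l = false := pvNoColon l h1
      simp only [pvGoA, pvPass1, h1, hc, if_true, Bool.false_eq_true, if_false]
      exact ih res
    · by_cases h2 : PySem.Str.isIn ":" l = true
      · simp only [pvGoA, pvPass1, if_neg h1, h2, if_true, ne_eq, not_true_eq_false, if_false]
        rw [pvPart1_eq]
        exact pvGoA_eq_pass ls res _ _
      · have h2' : PySem.Str.isIn ":" l = false := by
          cases hb : PySem.Str.isIn ":" l with
          | false => rfl
          | true => exact absurd hb h2
        simp only [pvGoA, pvPass1, if_neg h1, h2', Bool.false_eq_true, if_false, ne_eq,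
          not_true_eq_false]
        rw [if_pos (show ¬PySem.Str.strip l = "" from h1)]
        exact ih res

-- ===== VERDICT (by name: the statement is the Claim_ definition above) =====
theorem parse_kv_block_py_spec : Claim_equal_parse_kv_block_py := by
  intro block _ _
  unfold Spec_parse_kv_block_py parse_kv_block_py parse_kv_block_py_alt
  rw [pvGoA_init]
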